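-- pv_equiv track=rewrite | github.com/benellylevy/python-course-assignments | day5/dna_sequencing.py | extract_valid_sequences
-- ===== SOURCE A (Python) =====
-- def extract_valid_sequences(sequence):
--     # אנו מסננים רק את הבסיסים התקניים A, C, T, G, ומתעלמים רק מה-X
--     valid_bases = "ACTG"
--     valid_sequences = []
--     current_sequence = ""
--
--     for char in sequence:
--         if char == 'X':  # אם התו הוא 'X', נתחיל רצף חדש
--             if current_sequence:
--                 valid_sequences.append(current_sequence)
--                 current_sequence = ""  # נתחיל רצף חדש
--         elif char.isalpha() and char in valid_bases:  # אם התו הוא אות תקנית A, C, T, G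
--             current_sequence += char
--         elif not char.isalpha():  # אם לא מדובר באותיות, נתעלם מהן
--             continue
--
--     if current_sequence:  # נוסיף את הרצף האחרון אם יש
--         valid_sequences.append(current_sequence)
--
--     return valid_sequences
-- ===== SOURCE B (Python) =====
-- def extract_valid_sequences(sequence):
--     result = []
--     for segment in sequence.split('X'):
--         filtered = ''.join(c for c in segment if c in "ACTG")
--         if filtered:
--             result.append(filtered)
--     return result
-- ===== Notes on version B (the rewrite author's own statement) =====
-- stated objective: simpler
-- what changed: A's single-pass state machine (current-run accumulator flushed at each 'X') is replaced by a two-stage split-then-filter: split the string at 'X', keep the ACTG characters of each segment, and collect the non-empty results.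
import Mathlib
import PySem

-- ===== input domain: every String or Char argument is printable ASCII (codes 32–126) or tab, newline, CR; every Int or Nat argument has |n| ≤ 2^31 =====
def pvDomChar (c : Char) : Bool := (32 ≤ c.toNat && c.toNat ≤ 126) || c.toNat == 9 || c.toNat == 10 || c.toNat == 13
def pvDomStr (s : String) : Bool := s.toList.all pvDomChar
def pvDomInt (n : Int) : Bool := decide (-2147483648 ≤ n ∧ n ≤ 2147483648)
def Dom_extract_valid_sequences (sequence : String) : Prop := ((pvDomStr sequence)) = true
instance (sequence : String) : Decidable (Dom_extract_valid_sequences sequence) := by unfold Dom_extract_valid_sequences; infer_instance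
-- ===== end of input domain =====

-- B replaces A's one-pass state machine by split-at-'X' then per-segment filtering (objective: simpler); same return value everywhere.

-- ===== PORT A =====
-- A's loop: state = (valid_sequences, current_sequence), one step per character, branches in A's order.
def evsStep (st : List (List Char) × List Char) (char : Char) : List (List Char) × List Char :=
  if char = 'X' then
    (if st.2 ≠ [] then (st.1 ++ [st.2], []) else st)
  else if PySem.Chars.isalpha char && PySem.Chars.isIn [char] "ACTG".toList then
    (st.1, st.2 ++ [char])
  else if ¬ (PySem.Chars.isalpha char = true) then
    st  -- continue
  else
    st  -- fall through (alphabetic but not a valid base): loop body does nothing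

def extract_valid_sequences (sequence : String) : List String :=
  let st := sequence.toList.foldl evsStep ([], [])
  (if st.2 ≠ [] then st.1 ++ [st.2] else st.1).map String.ofList

-- ===== PORT B =====
-- ''.join(c for c in segment if c in "ACTG")
def evsFilter (seg : List Char) : List Char :=
  seg.filter (fun c => PySem.Chars.isIn [c] "ACTG".toList)

def extract_valid_sequences_alt (sequence : String) : List String :=
  (sequence.toList.splitOn 'X').foldl
    (fun result segment =>
      let filtered := String.ofList (evsFilter segment)
      if filtered ≠ "" then result ++ [filtered] else result)
    []

-- ===== PRECONDITION & SPEC =====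
def Spec_extract_valid_sequences (sequence : String) (out : List String) : Prop := out = extract_valid_sequences_alt sequence
instance (sequence : String) (out : List String) : Decidable (Spec_extract_valid_sequences sequence out) := by unfold Spec_extract_valid_sequences; infer_instance

-- ===== CLAIM (what is proved, stated in full; the proofs are below) =====
def Claim_equal_extract_valid_sequences : Prop := ∀ (sequence : String), Dom_extract_valid_sequences sequence → Spec_extract_valid_sequences sequence (extract_valid_sequences sequence)

-- ===== LEMMAS AND PROOFS =====

def evsCollect (segs : List (List Char)) : List (List Char) := segs.filter (· ≠ [])

-- a character is in "ACTG" iff it is one of the four base letters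
theorem evs_mem_iff (c : Char) : PySem.Chars.isIn [c] "ACTG".toList = true ↔ c ∈ ['A','C','T','G'] := by
  rw [PySem.Chars.isIn_iff_infix]
  exact List.singleton_infix_iff c "ACTG".toList

-- every valid base is alphabetic
theorem evs_alpha (c : Char) (h : PySem.Chars.isIn [c] "ACTG".toList = true) :
    PySem.Chars.isalpha c = true := by
  have hm := (evs_mem_iff c).1 h
  fin_cases hm <;> decide

theorem evsFilter_cons (c : Char) (l : List Char) :
    evsFilter (c :: l) = evsFilter [c] ++ evsFilter l := by
  unfold evsFilter
  rw [List.filter_cons, List.filter_cons]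
  by_cases h : PySem.Chars.isIn [c] "ACTG".toList = true
  · rw [if_pos h, if_pos h]; rfl
  · rw [if_neg h, if_neg h]; rfl

-- A's step, for c ≠ 'X', appends exactly the filtered character
theorem evsStep_ne (st : List (List Char) × List Char) (c : Char) (h : c ≠ 'X') :
    evsStep st c = (st.1, st.2 ++ evsFilter [c]) := by
  unfold evsStep evsFilter
  rw [if_neg h, List.filter_cons]
  by_cases hb : PySem.Chars.isIn [c] "ACTG".toList = true
  · rw [if_pos (by rw [evs_alpha c hb, hb]; rfl), if_pos hb]; rfl
  · rw [if_neg hb]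
    rw [if_neg (by rw [Bool.eq_false_iff.mpr hb, Bool.and_false]; simp)]
    simp only [List.filter_nil, List.append_nil]
    split_ifs <;> rfl

theorem evsCollect_cons (s : List Char) (segs : List (List Char)) :
    evsCollect (s :: segs) = (if s ≠ [] then [s] else []) ++ evsCollect segs := by
  unfold evsCollect
  rw [List.filter_cons]
  by_cases h : s = [] <;> simp [h]

-- main loop invariant for A's fold
theorem evs_main (l : List Char) : ∀ (acc : List (List Char)) (cur : List Char)
    (s0 : List Char) (rest : List (List Char)),
    l.splitOnP (· == 'X') = s0 :: rest →
    (fun st : List (List Char) × List Char => if st.2 ≠ [] then st.1 ++ [st.2] else st.1)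
        (l.foldl evsStep (acc, cur)) =
      acc ++ evsCollect ((cur ++ evsFilter s0) :: rest.map evsFilter) := by
  induction l with
  | nil =>
    intro acc cur s0 rest h
    rw [List.splitOnP_nil] at h
    obtain ⟨rfl, rfl⟩ : s0 = [] ∧ rest = [] := by simpa using h.symm
    show (if cur ≠ [] then acc ++ [cur] else acc) = _
    rw [evsCollect_cons]
    simp only [evsFilter, List.filter_nil, List.append_nil, evsCollect, List.filter_nil]
    split_ifs <;> simp
  | cons c l ih =>
    intro acc cur s0 rest h
    obtain ⟨s0', rest', h'⟩ : ∃ s0' rest', l.splitOnP (· == 'X') = s0' :: rest' := by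
      cases hl : l.splitOnP (· == 'X') with
      | nil => exact absurd hl (List.splitOnP_ne_nil _ _)
      | cons a b => exact ⟨a, b, rfl⟩
    by_cases hX : c = 'X'
    · subst hX
      rw [List.splitOnP_cons, if_pos (by decide), h'] at h
      obtain ⟨rfl, rfl⟩ : s0 = [] ∧ rest = s0' :: rest' := by simpa using h.symm
      have hstep : evsStep (acc, cur) 'X' =
          ((if cur ≠ [] then acc ++ [cur] else acc), []) := by
        unfold evsStep
        rw [if_pos rfl]
        split_ifs <;> simp_all
      rw [List.foldl_cons, hstep, ih _ _ _ _ h']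
      rw [show evsFilter ([] : List Char) = [] from rfl, List.append_nil,
        List.nil_append, List.map_cons, evsCollect_cons cur]
      by_cases hc : cur = [] <;> simp [hc]
    · rw [List.splitOnP_cons, if_neg (by simpa using hX), h'] at h
      obtain ⟨rfl, rfl⟩ : s0 = c :: s0' ∧ rest = rest' := by
        cases h.symm; exact ⟨rfl, rfl⟩
      rw [List.foldl_cons, evsStep_ne _ _ hX, ih _ _ _ _ h']
      conv_rhs => rw [evsFilter_cons c s0']
      simp [List.append_assoc]

-- a string built from a character list is empty iff the list is
theorem evs_ofList_ne (xs : List Char) : (String.ofList xs ≠ "") ↔ xs ≠ [] := by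
  simp [String.ext_iff]

-- B's fold appends exactly the nonempty filtered segments
theorem evs_bfold (segs : List (List Char)) : ∀ (init : List String),
    segs.foldl
      (fun result segment =>
        let filtered := String.ofList (evsFilter segment)
        if filtered ≠ "" then result ++ [filtered] else result) init =
    init ++ (evsCollect (segs.map evsFilter)).map String.ofList := by
  induction segs with
  | nil => intro init; simp [evsCollect]
  | cons s segs ih =>
    intro init
    rw [List.foldl_cons, List.map_cons, evsCollect_cons]
    by_cases h : evsFilter s = []
    · show segs.foldl _ (if String.ofList (evsFilter s) ≠ "" then init ++ [String.ofList (evsFilter s)] else init) = _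
      rw [if_neg (by simp [h]), ih, if_neg (by simp [h])]
      simp
    · show segs.foldl _ (if String.ofList (evsFilter s) ≠ "" then init ++ [String.ofList (evsFilter s)] else init) = _
      rw [if_pos ((evs_ofList_ne _).2 h), ih, if_pos h]
      simp

-- ===== VERDICT (by name: the statement is the Claim_ definition above) =====
theorem extract_valid_sequences_spec : Claim_equal_extract_valid_sequences := by
  intro sequence _
  unfold Spec_extract_valid_sequences extract_valid_sequences extract_valid_sequences_alt
  obtain ⟨s0, rest, h⟩ : ∃ s0 rest, (sequence.toList).splitOnP (· == 'X') = s0 :: rest := by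
    cases hl : (sequence.toList).splitOnP (· == 'X') with
    | nil => exact absurd hl (List.splitOnP_ne_nil _ _)
    | cons a b => exact ⟨a, b, rfl⟩
  rw [List.splitOn, h, evs_bfold]
  have hm := evs_main sequence.toList [] [] s0 rest h
  simp only [List.nil_append] at hm ⊢
  show ((if (sequence.toList.foldl evsStep ([], [])).2 ≠ [] then
          (sequence.toList.foldl evsStep ([], [])).1 ++ [(sequence.toList.foldl evsStep ([], [])).2]
        else (sequence.toList.foldl evsStep ([], [])).1)).map String.ofList = _
  rw [hm, List.map_cons, evsCollect_cons]
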